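-- pv_equiv track=rewrite | github.com/HG-Shin/Study | 알고리즘/프로그래머스/완전탐색/피로도.py | solution
-- ===== SOURCE A (Python) =====
-- from itertools import permutations
--
-- def solution(k, dungeons):
--     result = []
--
--     for dungeon in permutations(dungeons, len(dungeons)):
--         count = 0
--         hp = k
--
--         for tmp in dungeon:
--             if hp >= tmp[0]:
--                 hp -= tmp[1]
--                 count += 1
--
--         result.append(count)
--
--     return max(result)
-- ===== SOURCE B (Python) =====
-- def solution(k, dungeons):
--     return _best(k, dungeons)
--
--
-- def _best(hp, remaining):
--     top = 0
--     for i in range(len(remaining)):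
--         d = remaining[i]
--         if hp >= d[0]:
--             top = max(top, 1 + _best(hp - d[1], remaining[:i] + remaining[i + 1:]))
--     return top
-- ===== Notes on version B (the rewrite author's own statement) =====
-- stated objective: alternative
-- what changed: A materializes all n! permutations and greedy-scans each; B is a recursive backtracking search that at each step tries only the still-affordable dungeons and recurses on the rest, never visiting infeasible orderings.
-- outside the precondition, e.g. on solution(0, [[5]]): A returns 0, B returns 0; on solution(7, [[5]]): A raises IndexError, B raises IndexError
import Mathlib
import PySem

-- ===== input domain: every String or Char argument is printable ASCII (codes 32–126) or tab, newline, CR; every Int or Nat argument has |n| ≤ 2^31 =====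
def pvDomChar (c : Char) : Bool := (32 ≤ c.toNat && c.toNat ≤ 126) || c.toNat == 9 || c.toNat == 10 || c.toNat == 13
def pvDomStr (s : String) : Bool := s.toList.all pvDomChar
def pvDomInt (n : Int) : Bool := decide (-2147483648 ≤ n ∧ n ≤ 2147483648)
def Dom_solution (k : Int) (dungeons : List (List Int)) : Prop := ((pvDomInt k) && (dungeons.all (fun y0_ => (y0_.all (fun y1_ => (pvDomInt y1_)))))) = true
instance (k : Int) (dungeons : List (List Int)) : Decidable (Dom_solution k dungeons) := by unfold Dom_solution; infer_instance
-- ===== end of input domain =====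

-- B replaces A's enumeration of all n! permutations (greedy-scanning each) with a
-- recursive backtracking search that only descends into affordable dungeons (alternative decomposition, same worst-case cost).


-- ===== PORT A =====
-- for dungeon in permutations(dungeons, len(dungeons)): greedy scan with (count, hp); then max(result).
-- tmp[0] / tmp[1] via pyGetD, in range under Pre_solution.
def solution (k : Int) (dungeons : List (List Int)) : Int :=
  let result : List Int :=
    (PySem.List.permutations dungeons dungeons.length).map (fun dungeon =>
      (dungeon.foldl
        (fun (st : Int × Int) tmp =>
          if st.2 ≥ PySem.List.pyGetD tmp 0 0 then (st.1 + 1, st.2 - PySem.List.pyGetD tmp 1 0)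
          else st)
        (0, k)).1)
  -- max(result): result is nonempty (permutations always yields at least one tuple)
  (PySem.List.max? result (fun x => x)).getD 0

-- ===== PORT B =====
-- recursive backtracking: try every still-affordable dungeon i, recurse on remaining[:i] + remaining[i+1:].
-- fuel = length of the remaining list (the recursion removes one element per call).
def bestB : Nat → Int → List (List Int) → Int
  | 0, _, _ => 0
  | f + 1, hp, remaining =>
    (List.range remaining.length).foldl
      (fun top i =>
        let d := remaining.getD i []
        if hp ≥ PySem.List.pyGetD d 0 0 then
          max top (1 + bestB f (hp - PySem.List.pyGetD d 1 0)
            (PySem.List.slice remaining none (some (i : Int)) ++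
             PySem.List.slice remaining (some ((i : Int) + 1)) none))
        else top)
      0

def solution_alt (k : Int) (dungeons : List (List Int)) : Int :=
  bestB dungeons.length k dungeons

-- ===== PRECONDITION & SPEC =====
-- Pre_ requires each dungeon entry to carry the two components the programs read
-- (on shorter entries Python A raises IndexError, except accidentally when the
-- missing component is never reached because the entry is never affordable).
def Pre_solution (k : Int) (dungeons : List (List Int)) : Prop :=
  ∀ d ∈ dungeons, 2 ≤ d.length
instance (k : Int) (dungeons : List (List Int)) : Decidable (Pre_solution k dungeons) := by
  unfold Pre_solution; infer_instance

def pvWitness_solution : Int × List (List Int) := (80, [[80, 20], [50, 40], [30, 10]])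

def Spec_solution (k : Int) (dungeons : List (List Int)) (out : Int) : Prop := out = solution_alt k dungeons
instance (k : Int) (dungeons : List (List Int)) (out : Int) : Decidable (Spec_solution k dungeons out) := by unfold Spec_solution; infer_instance

-- ===== CLAIM (what is proved, stated in full; the proofs are below) =====
def Claim_equal_solution : Prop := ∀ (k : Int) (dungeons : List (List Int)), Dom_solution k dungeons → Pre_solution k dungeons → Spec_solution k dungeons (solution k dungeons)

-- ===== LEMMAS AND PROOFS =====

-- shorthand for the two components a program reads from an entry
def ent0 (d : List Int) : Int := PySem.List.pyGetD d 0 0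
def ent1 (d : List Int) : Int := PySem.List.pyGetD d 1 0

-- A's inner greedy scan, as a structural recursion on the permutation
def gcnt : Int → List (List Int) → Int
  | _, [] => 0
  | hp, d :: p => if hp ≥ ent0 d then 1 + gcnt (hp - ent1 d) p else gcnt hp p

lemma gcnt_nonneg (hp : Int) (p : List (List Int)) : 0 ≤ gcnt hp p := by
  induction p generalizing hp with
  | nil => simp [gcnt]
  | cons d p ih =>
    simp only [gcnt]
    split_ifs
    · have := ih (hp - ent1 d); omega
    · exact ih hp

-- A's foldl pair-loop computes gcnt
lemma foldA (p : List (List Int)) (c hp : Int) :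
    (p.foldl
      (fun (st : Int × Int) tmp =>
        if st.2 ≥ PySem.List.pyGetD tmp 0 0 then (st.1 + 1, st.2 - PySem.List.pyGetD tmp 1 0)
        else st)
      (c, hp)).1 = c + gcnt hp p := by
  induction p generalizing c hp with
  | nil => simp [gcnt]
  | cons d p ih =>
    simp only [List.foldl_cons, gcnt, ent0, ent1]
    split_ifs with h
    · rw [ih]; ring
    · rw [ih]

-- generic facts about the conditional running-max fold
lemma condMax_ge_init {L : List Nat} {C : Nat → Prop} [DecidablePred C] {V : Nat → Int} {a : Int} :
    a ≤ L.foldl (fun top i => if C i then max top (V i) else top) a := by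
  induction L generalizing a with
  | nil => simp
  | cons x L ih =>
    refine le_trans ?_ (ih (a := if C x then max a (V x) else a))
    split_ifs
    · exact le_max_left _ _
    · exact le_refl a

lemma condMax_ge_elem {L : List Nat} {C : Nat → Prop} [DecidablePred C] {V : Nat → Int} {a : Int}
    {i : Nat} (hi : i ∈ L) (hc : C i) :
    V i ≤ L.foldl (fun top i => if C i then max top (V i) else top) a := by
  induction L generalizing a with
  | nil => simp at hi
  | cons x L ih =>
    rcases List.mem_cons.mp hi with rfl | hi'
    · refine le_trans ?_ (condMax_ge_init (a := if C i then max a (V i) else a))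
      rw [if_pos hc]
      exact le_max_right _ _
    · exact ih hi'

lemma condMax_cases {L : List Nat} {C : Nat → Prop} [DecidablePred C] {V : Nat → Int} {a : Int} :
    L.foldl (fun top i => if C i then max top (V i) else top) a = a ∨
      ∃ i ∈ L, C i ∧ L.foldl (fun top i => if C i then max top (V i) else top) a = V i := by
  induction L generalizing a with
  | nil => left; rfl
  | cons x L ih =>
    simp only [List.foldl_cons]
    by_cases hx : C x
    · rw [if_pos hx]
      rcases ih (a := max a (V x)) with h0 | ⟨i, hi, hc, he⟩
      · rcases max_choice a (V x) with hm | hm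
        · left; rw [h0, hm]
        · right; exact ⟨x, List.mem_cons_self .., hx, by rw [h0, hm]⟩
      · right; exact ⟨i, List.mem_cons_of_mem _ hi, hc, he⟩
    · rw [if_neg hx]
      rcases ih (a := a) with h0 | ⟨i, hi, hc, he⟩
      · left; exact h0
      · right; exact ⟨i, List.mem_cons_of_mem _ hi, hc, he⟩

-- B's slice pair is eraseIdx
lemma slice_pair_eq_eraseIdx (l : List (List Int)) (i : Nat) :
    PySem.List.slice l none (some (i : Int)) ++ PySem.List.slice l (some ((i : Int) + 1)) none
      = l.eraseIdx i := by
  rw [PySem.List.slice_to l (by positivity), PySem.List.slice_from l (by positivity)]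
  have h1 : ((i : Int)).toNat = i := Int.toNat_natCast i
  have h2 : ((i : Int) + 1).toNat = i + 1 := by omega
  rw [h1, h2, List.eraseIdx_eq_take_drop_succ]

lemma bestB_succ (f : Nat) (hp : Int) (l : List (List Int)) :
    bestB (f + 1) hp l =
      (List.range l.length).foldl
        (fun top i =>
          if hp ≥ ent0 (l.getD i []) then
            max top (1 + bestB f (hp - ent1 (l.getD i [])) (l.eraseIdx i))
          else top)
        0 := by
  simp only [bestB, slice_pair_eq_eraseIdx, ent0, ent1]

lemma bestB_nonneg (f : Nat) (hp : Int) (l : List (List Int)) : 0 ≤ bestB f hp l := by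
  cases f with
  | zero => simp [bestB]
  | succ f => rw [bestB_succ]; exact condMax_ge_init

-- every greedy value over a sub-permutation is at most the backtracking optimum
lemma gcnt_le_bestB (p : List (List Int)) :
    ∀ (hp : Int) (l : List (List Int)) (f : Nat), p.Subperm l → l.length ≤ f →
      gcnt hp p ≤ bestB f hp l := by
  induction p with
  | nil => intro hp l f _ _; simpa [gcnt] using bestB_nonneg f hp l
  | cons d p ih =>
    intro hp l f hsub hf
    by_cases hcond : hp ≥ ent0 d
    · have hd : d ∈ l := hsub.subset (List.mem_cons_self ..)
      have hi : List.idxOf d l < l.length := List.idxOf_lt_length_of_mem hd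
      have hget : l[List.idxOf d l] = d := List.getElem_idxOf hi
      obtain ⟨f', rfl⟩ : ∃ f', f = f' + 1 := ⟨f - 1, by omega⟩
      have herase : p.Subperm (l.eraseIdx (List.idxOf d l)) := by
        have h1 := List.Subperm.erase d hsub
        rw [List.erase_cons_head, List.erase_eq_eraseIdx_of_idxOf rfl] at h1
        exact h1
      have hlen : (l.eraseIdx (List.idxOf d l)).length ≤ f' := by
        rw [List.length_eraseIdx, if_pos hi]; omega
      have hIH := ih (hp - ent1 d) (l.eraseIdx (List.idxOf d l)) f' herase hlen
      have hgd : l.getD (List.idxOf d l) [] = d := by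
        rw [List.getD_eq_getElem _ _ hi, hget]
      have hmem : List.idxOf d l ∈ List.range l.length := List.mem_range.mpr hi
      have hVle := condMax_ge_elem (a := (0 : Int))
        (C := fun i => hp ≥ ent0 (l.getD i []))
        (V := fun i => 1 + bestB f' (hp - ent1 (l.getD i [])) (l.eraseIdx i))
        hmem (show hp ≥ ent0 (l.getD (List.idxOf d l) []) by rw [hgd]; exact hcond)
      rw [bestB_succ]
      simp only [gcnt, if_pos hcond]
      simp only [hgd] at hVle
      omega
    · have hsub' : p.Subperm l := ((List.sublist_cons_self d p).subperm).trans hsub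
      simpa [gcnt, hcond] using ih hp l f hsub' hf

-- the backtracking optimum is attained by some permutation's greedy value
lemma bestB_le_gcnt (f : Nat) :
    ∀ (l : List (List Int)) (hp : Int), l.length ≤ f →
      ∃ p, p.Perm l ∧ bestB f hp l ≤ gcnt hp p := by
  induction f with
  | zero =>
    intro l hp hlen
    have : l = [] := List.eq_nil_of_length_eq_zero (by omega)
    subst this
    exact ⟨[], List.Perm.refl _, by simp [bestB, gcnt]⟩
  | succ f ih =>
    intro l hp hlen
    have hc := condMax_cases (L := List.range l.length) (a := (0 : Int))
      (C := fun i => hp ≥ ent0 (l.getD i []))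
      (V := fun i => 1 + bestB f (hp - ent1 (l.getD i [])) (l.eraseIdx i))
    rw [← bestB_succ] at hc
    rcases hc with h0 | ⟨i, hiL, hC, hEq⟩
    · exact ⟨l, List.Perm.refl _, h0 ▸ gcnt_nonneg hp l⟩
    · have hi : i < l.length := List.mem_range.mp hiL
      have hgd : l.getD i [] = l[i] := List.getD_eq_getElem _ _ hi
      have hlen' : (l.eraseIdx i).length ≤ f := by
        rw [List.length_eraseIdx, if_pos hi]; omega
      obtain ⟨rest, hperm, hle⟩ := ih (l.eraseIdx i) (hp - ent1 (l[i])) hlen'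
      refine ⟨l[i] :: rest, ?_, ?_⟩
      · exact (hperm.cons l[i]).trans (List.getElem_cons_eraseIdx_perm hi)
      · rw [hgd] at hC hEq
        simp only [gcnt, if_pos hC]
        omega

-- converse of PySem.List.perm_of_mem_permutations
lemma mem_permutations_of_perm (p : List (List Int)) :
    ∀ l, p.Perm l → p ∈ PySem.List.permutations l l.length := by
  induction p with
  | nil =>
    intro l h
    have : l = [] := h.symm.eq_nil
    subst this
    simp
  | cons d rest ih =>
    intro l h
    have hd : d ∈ l := h.subset (List.mem_cons_self ..)
    have hi : List.idxOf d l < l.length := List.idxOf_lt_length_of_mem hd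
    have hget : l[List.idxOf d l] = d := List.getElem_idxOf hi
    have hrest : rest.Perm (l.eraseIdx (List.idxOf d l)) := by
      have h1 := (List.cons_perm_iff_perm_erase.mp h).2
      rwa [List.erase_eq_eraseIdx_of_idxOf rfl] at h1
    have hlen : l.length = (l.eraseIdx (List.idxOf d l)).length + 1 := by
      rw [List.length_eraseIdx, if_pos hi]; omega
    rw [hlen]
    simp only [PySem.List.permutations]
    rw [List.mem_flatMap]
    refine ⟨List.idxOf d l, List.mem_range.mpr (by omega), ?_⟩
    rw [List.getElem?_eq_getElem hi, hget]
    simp only [List.mem_map]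
    exact ⟨rest, ih _ hrest, rfl⟩

-- ===== VERDICT (by name: the statement is the Claim_ definition above) =====
lemma map_count_eq_map_gcnt (k : Int) (P : List (List (List Int))) :
    P.map (fun dungeon =>
      (dungeon.foldl
        (fun (st : Int × Int) tmp =>
          if st.2 ≥ PySem.List.pyGetD tmp 0 0 then (st.1 + 1, st.2 - PySem.List.pyGetD tmp 1 0)
          else st)
        (0, k)).1) = P.map (gcnt k) := by
  refine List.map_congr_left (fun p _ => ?_)
  rw [foldA p 0 k]
  ring

-- ===== VERDICT (by name: the statement is the Claim_ definition above) =====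
theorem solution_spec : Claim_equal_solution := by
  intro k ds _ _
  unfold Spec_solution solution solution_alt
  simp only [map_count_eq_map_gcnt]
  have hds : ds ∈ PySem.List.permutations ds ds.length :=
    mem_permutations_of_perm ds ds (List.Perm.refl ds)
  cases hM : PySem.List.max? ((PySem.List.permutations ds ds.length).map (gcnt k)) (fun x => x) with
  | none =>
    rw [PySem.List.max?_eq_none_iff] at hM
    rw [List.map_eq_nil_iff] at hM
    rw [hM] at hds
    simp at hds
  | some m =>
    have hmem := PySem.List.max?_mem hM
    obtain ⟨p0, hp0, hm⟩ := List.mem_map.mp hmem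
    have hperm0 := PySem.List.perm_of_mem_permutations hp0
    have hub : m ≤ bestB ds.length k ds := by
      rw [← hm]
      exact gcnt_le_bestB p0 k ds ds.length hperm0.subperm (le_refl _)
    obtain ⟨p1, hperm1, hle1⟩ := bestB_le_gcnt ds.length ds k (le_refl _)
    have hmemp1 : gcnt k p1 ∈ (PySem.List.permutations ds ds.length).map (gcnt k) :=
      List.mem_map.mpr ⟨p1, mem_permutations_of_perm p1 ds hperm1, rfl⟩
    have hlb := PySem.List.max?_isMax hM _ hmemp1
    simp only [Option.getD_some]
    omega
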